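-- pv_equiv track=rewrite | github.com/izaxs/algo | pycode/08/0815.py | numBusesToDestination4
-- ===== SOURCE A (Python) =====
-- from collections import deque
--
-- def numBusesToDestination4(routes: list[list[int]], source: int, target: int) -> int:
--     bussesAtStop: dict[int, list[int]] = {}
--     for busId, stops in enumerate(routes):
--         for stop in stops:
--             bussesAtStop.setdefault(stop, []).append(busId)
--     busCount = 0
--     curStops: deque[int] = deque([source])
--     visited: set[int] = set([source])
--     while curStops:
--         size = len(curStops)
--         for _ in range(size):
--             stop = curStops.popleft()
--             if stop == target: return busCount
--             for bus in bussesAtStop[stop]: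
--                 for nextStop in routes[bus]:
--                     if nextStop in visited: continue
--                     curStops.append(nextStop)
--                     visited.add(nextStop)
--                 routes[bus] = []
--         busCount += 1
--     return -1
-- ===== SOURCE B (Python) =====
-- def numBusesToDestination4(routes, source, target):
--     # Round-based saturation: no queue, no stop->bus index; each round scans all
--     # routes, takes every unused bus touching the visited stops, and adds its stops.
--     if source == target:
--         return 0
--     visited = {source}
--     used = set()
--     count = 0
--     while True:
--         count += 1
--         newBuses = [b for b in range(len(routes))
--                     if b not in used and any(s in visited for s in routes[b])]
--         if not newBuses:
--             return -1
--         newStops = set()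
--         for b in newBuses:
--             used.add(b)
--             for s in routes[b]:
--                 if s not in visited:
--                     newStops.add(s)
--         if target in newStops:
--             return count
--         for s in newStops:
--             visited.add(s)
-- ===== Notes on version B (the rewrite author's own statement) =====
-- stated objective: alternative
-- what changed: Replaces the queue-driven stop-BFS with its stop->buses index and in-place route clearing by an index-free round-based saturation: each round scans all routes once, marks every not-yet-used bus that touches the visited-stop set, collects those buses' fresh stops, and counts rounds; no deque, no dict index, no mutation of routes.
-- outside the precondition, e.g. on numBusesToDestination4([[1, 2]], 0, 1): A raises KeyError, B returns -1
import Mathlib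
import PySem

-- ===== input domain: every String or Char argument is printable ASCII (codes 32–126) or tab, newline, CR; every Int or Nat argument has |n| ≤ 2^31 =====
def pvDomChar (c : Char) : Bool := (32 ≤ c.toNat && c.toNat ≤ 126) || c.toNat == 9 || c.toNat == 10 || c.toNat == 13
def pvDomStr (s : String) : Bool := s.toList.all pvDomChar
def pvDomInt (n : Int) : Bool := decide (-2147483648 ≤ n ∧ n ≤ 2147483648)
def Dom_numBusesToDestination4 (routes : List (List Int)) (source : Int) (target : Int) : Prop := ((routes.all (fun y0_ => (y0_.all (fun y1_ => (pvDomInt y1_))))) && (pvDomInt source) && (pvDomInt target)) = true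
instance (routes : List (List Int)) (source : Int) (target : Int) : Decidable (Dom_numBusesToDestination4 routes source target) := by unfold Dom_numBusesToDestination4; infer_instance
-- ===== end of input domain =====

-- B replaces A's queue-driven stop-BFS (stop→buses dict index, deque, in-place route clearing)
-- by an index-free round-based saturation over the routes list; same return value on Pre_.
-- A mutates `routes` in place (routes[bus] = []); the ports are pure, so the equivalence
-- proved here is about the return value only.

-- ===== PORT A =====
-- bussesAtStop.setdefault(stop, []).append(busId)  ==  d[stop] = d.get(stop, []) + [busId]
def pvIndexAdd (d : PySem.Dict Int (List Int)) (busId : Int) (stops : List Int) : PySem.Dict Int (List Int) :=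
  stops.foldl (fun d stop => d.modify stop [] (· ++ [busId])) d

def pvBuildIndex (routes : List (List Int)) : PySem.Dict Int (List Int) :=
  (PySem.List.enumerate routes 0).foldl (fun d p => pvIndexAdd d p.1 p.2) PySem.Dict.empty

-- one `bus` of A's inner loop: enqueue the unvisited stops of routes[bus], then routes[bus] = []
-- (pyGetD/pySetD are exact: bus always is a valid index, it came from enumerate(routes))
def pvVisitBus (st : List (List Int) × List Int × PySem.Set Int) (bus : Int) :
    List (List Int) × List Int × PySem.Set Int :=
  let r := PySem.List.pyGetD st.1 bus []
  let qv := r.foldl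
    (fun (p : List Int × PySem.Set Int) nextStop =>
      if PySem.Set.contains p.2 nextStop then p
      else (p.1 ++ [nextStop], PySem.Set.add p.2 nextStop)) (st.2.1, st.2.2)
  (PySem.List.pySetD st.1 bus [], qv.1, qv.2)

-- the `for _ in range(size)` pass over one BFS level; .inl = early `return busCount`.
-- bussesAtStop[stop]: getD [] is exact under Pre_ — every stop that is ever queued lies on
-- some route (Pre_ excludes exactly the KeyError input: source on no route, source ≠ target)
def pvProcLevel (index : PySem.Dict Int (List Int)) (target : Int) (busCount : Int) :
    List Int → List (List Int) × List Int × PySem.Set Int →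
    Sum Int (List (List Int) × List Int × PySem.Set Int)
  | [], st => .inr st
  | stop :: rest, st =>
    if stop = target then .inl busCount
    else pvProcLevel index target busCount rest ((index.getD stop []).foldl pvVisitBus st)

-- the `while curStops:` loop; fuel routes.length + 2 bounds its iteration count (each
-- level past the first that enqueues anything clears at least one route; proved below)
def pvLoopA (index : PySem.Dict Int (List Int)) (target : Int) :
    Nat → List (List Int) → List Int → PySem.Set Int → Int → Int
  | 0, _, _, _, _ => -1
  | fuel+1, rs, q, vis, busCount =>
    if q.isEmpty then -1
    else
      match pvProcLevel index target busCount q (rs, [], vis) with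
      | .inl r => r
      | .inr (rs', q', vis') => pvLoopA index target fuel rs' q' vis' (busCount + 1)

def numBusesToDestination4 (routes : List (List Int)) (source : Int) (target : Int) : Int :=
  pvLoopA (pvBuildIndex routes) target (routes.length + 2) routes [source]
    (PySem.Set.ofList [source]) 0

-- ===== PORT B =====
-- one round's marking loop: used.add(b); newStops.add(s) for the unvisited stops of routes[b]
def pvMarkBuses (routes : List (List Int)) (visited : PySem.Set Int)
    (newBuses : List Int) (used : PySem.Set Int) : PySem.Set Int × PySem.Set Int :=
  newBuses.foldl
    (fun (p : PySem.Set Int × PySem.Set Int) b =>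
      (PySem.Set.add p.1 b,
       (PySem.List.pyGetD routes b []).foldl
         (fun ns s => if PySem.Set.contains visited s then ns else PySem.Set.add ns s) p.2))
    (used, PySem.Set.empty)

-- Source B's `while True:`; fuel routes.length + 2 bounds its iteration count (every round
-- that does not return marks at least one new bus used; proved below)
def pvRoundB (routes : List (List Int)) (target : Int) :
    Nat → PySem.Set Int → PySem.Set Int → Int → Int
  | 0, _, _, _ => -1
  | fuel+1, visited, used, count0 =>
    let count := count0 + 1
    let newBuses := (PySem.List.pyRange 0 (PySem.List.len routes) 1).filter
      (fun b => !(PySem.Set.contains used b) &&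
        (PySem.List.pyGetD routes b []).any (fun s => PySem.Set.contains visited s))
    if newBuses.isEmpty then -1
    else
      let p := pvMarkBuses routes visited newBuses used
      if PySem.Set.contains p.2 target then count
      else pvRoundB routes target fuel (PySem.Set.update visited p.2) p.1 count

def numBusesToDestination4_alt (routes : List (List Int)) (source : Int) (target : Int) : Int :=
  if source = target then 0
  else pvRoundB routes target (routes.length + 2) (PySem.Set.ofList [source]) PySem.Set.empty 0

-- ===== PRECONDITION & SPEC =====
-- Pre_ excludes exactly the inputs on which A raises KeyError (bussesAtStop[source]):
-- source lies on no route and source ≠ target.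
def Pre_numBusesToDestination4 (routes : List (List Int)) (source : Int) (target : Int) : Prop :=
  source = target ∨ ∃ r ∈ routes, source ∈ r
instance (routes : List (List Int)) (source : Int) (target : Int) :
    Decidable (Pre_numBusesToDestination4 routes source target) := by
  unfold Pre_numBusesToDestination4; infer_instance

def pvWitness_numBusesToDestination4 : List (List Int) × Int × Int := ([[1, 2]], 1, 2)

def Spec_numBusesToDestination4 (routes : List (List Int)) (source : Int) (target : Int) (out : Int) : Prop := out = numBusesToDestination4_alt routes source target
instance (routes : List (List Int)) (source : Int) (target : Int) (out : Int) : Decidable (Spec_numBusesToDestination4 routes source target out) := by unfold Spec_numBusesToDestination4; infer_instance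

-- ===== CLAIM (what is proved, stated in full; the proofs are below) =====
def Claim_equal_numBusesToDestination4 : Prop := ∀ (routes : List (List Int)) (source : Int) (target : Int), Dom_numBusesToDestination4 routes source target → Pre_numBusesToDestination4 routes source target → Spec_numBusesToDestination4 routes source target (numBusesToDestination4 routes source target)


-- ===== LEMMAS AND PROOFS =====

theorem getD_pvIndexAdd (d : PySem.Dict Int (List Int)) (busId : Int) (stops : List Int) (s : Int) :
    (pvIndexAdd d busId stops).getD s []
      = d.getD s [] ++ (stops.filter (fun t => t == s)).map (fun _ => busId) := by
  unfold pvIndexAdd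
  have h : stops.foldl (fun d stop => d.modify stop [] (· ++ [busId])) d
      = (stops.map (fun t => (t, busId))).foldl (fun d p => d.modify p.1 [] (· ++ [p.2])) d := by
    rw [List.foldl_map]
  rw [h, PySem.Dict.getD_foldl_modify_append, List.filter_map, List.map_map]
  simp [Function.comp_def, List.map_const']
theorem mem_pvBuildIndexAux (rs : List (List Int)) :
    ∀ (off : Int) (d : PySem.Dict Int (List Int)) (s b : Int),
    b ∈ ((PySem.List.enumerate rs off).foldl (fun d p => pvIndexAdd d p.1 p.2) d).getD s []
      ↔ b ∈ d.getD s [] ∨ ∃ i : Nat, i < rs.length ∧ b = off + (i : Int) ∧ s ∈ rs.getD i [] := by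
  induction rs with
  | nil => intro off d s b; simp [PySem.List.enumerate_nil]
  | cons r rs ih =>
    intro off d s b
    rw [PySem.List.enumerate_cons, List.foldl_cons, ih]
    have hmem : b ∈ (pvIndexAdd d off r).getD s [] ↔ b ∈ d.getD s [] ∨ (b = off ∧ s ∈ r) := by
      rw [getD_pvIndexAdd]
      simp only [List.mem_append, List.mem_map, List.mem_filter, beq_iff_eq]
      constructor
      · rintro (h | ⟨t, ⟨ht, rfl⟩, rfl⟩)
        · exact .inl h
        · exact .inr ⟨rfl, ht⟩
      · rintro (h | ⟨rfl, ht⟩)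
        · exact .inl h
        · exact .inr ⟨s, ⟨ht, rfl⟩, rfl⟩
    rw [hmem]
    constructor
    · rintro ((h | ⟨rfl, ht⟩) | ⟨i, hi, rfl, hs⟩)
      · exact .inl h
      · exact .inr ⟨0, by simp, by simp, by simpa using ht⟩
      · refine .inr ⟨i + 1, by simp [hi], by push_cast; ring, by simpa using hs⟩
    · rintro (h | ⟨i, hi, rfl, hs⟩)
      · exact .inl (.inl h)
      · cases i with
        | zero => exact .inl (.inr ⟨by simp, by simpa using hs⟩)
        | succ j =>
          refine .inr ⟨j, by simp only [List.length_cons] at hi; omega, by push_cast; ring, by simpa using hs⟩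
theorem mem_pvBuildIndex (routes : List (List Int)) (s b : Int) :
    b ∈ (pvBuildIndex routes).getD s []
      ↔ ∃ i : Nat, i < routes.length ∧ b = (i : Int) ∧ s ∈ routes.getD i [] := by
  unfold pvBuildIndex
  rw [mem_pvBuildIndexAux]
  simp [PySem.Dict.getD_empty]
theorem getD_set_list (l : List (List Int)) (i j : Nat) (hi : i < l.length) (a : List Int) :
    (l.set i a).getD j [] = if i = j then a else l.getD j [] := by
  simp only [List.getD_eq_getElem?_getD, List.getElem?_set, hi, if_true]
  split <;> simp
-- A's innermost loop: append the unvisited stops of a route to the queue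
theorem pvFoldAdd (r : List Int) :
    ∀ (q : List Int) (vis : PySem.Set Int), vis.Nodup →
    ∃ q' vis',
      r.foldl (fun (p : List Int × PySem.Set Int) t =>
          if PySem.Set.contains p.2 t then p
          else (p.1 ++ [t], PySem.Set.add p.2 t)) (q, vis) = (q', vis')
      ∧ vis'.Nodup
      ∧ (∀ x, x ∈ vis' ↔ x ∈ vis ∨ x ∈ r)
      ∧ (∀ x, x ∈ q' ↔ x ∈ q ∨ (x ∈ r ∧ x ∉ vis)) := by
  induction r with
  | nil => intro q vis hnd; exact ⟨q, vis, rfl, hnd, by simp, by simp⟩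
  | cons t r ih =>
    intro q vis hnd
    simp only [List.foldl_cons]
    by_cases ht : t ∈ vis
    · rw [if_pos (by simpa [PySem.Set.contains_iff] using ht)]
      obtain ⟨q', vis', heq, h1, h2, h3⟩ := ih q vis hnd
      refine ⟨q', vis', heq, h1, fun x => ?_, fun x => ?_⟩
      · rw [h2]
        simp only [List.mem_cons]
        constructor
        · rintro (h | h)
          · exact .inl h
          · exact .inr (.inr h)
        · rintro (h | rfl | h)
          · exact .inl h
          · exact .inl ht
          · exact .inr h
      · rw [h3]
        simp only [List.mem_cons]
        constructor
        · rintro (h | ⟨h, hv⟩)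
          · exact .inl h
          · exact .inr ⟨.inr h, hv⟩
        · rintro (h | ⟨h | h, hv⟩)
          · exact .inl h
          · exact absurd (h ▸ ht) hv
          · exact .inr ⟨h, hv⟩
    · rw [if_neg (by simpa [PySem.Set.contains_iff] using ht)]
      obtain ⟨q', vis', heq, h1, h2, h3⟩ := ih (q ++ [t]) (PySem.Set.add vis t)
        (PySem.Set.nodup_add _ _ hnd)
      refine ⟨q', vis', heq, h1, fun x => ?_, fun x => ?_⟩
      · rw [h2, PySem.Set.mem_add]
        simp only [List.mem_cons]
        tauto
      · rw [h3, PySem.Set.mem_add]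
        simp only [List.mem_append, List.mem_cons, List.not_mem_nil, or_false]
        constructor
        · rintro ((h | rfl) | ⟨h, hv⟩)
          · exact .inl h
          · exact .inr ⟨.inl rfl, ht⟩
          · exact .inr ⟨.inr h, fun hx => hv (.inl hx)⟩
        · rintro (h | ⟨h | h, hv⟩)
          · exact .inl (.inl h)
          · exact .inl (.inr h)
          · by_cases hxt : x = t
            · exact .inl (.inr hxt)
            · refine .inr ⟨h, fun hx => ?_⟩
              rcases hx with h' | rfl
              · exact hv h'
              · exact hxt rfl
theorem pvFoldVisit (routes : List (List Int)) :
    ∀ (BL : List Int) (rs : List (List Int)) (q : List Int) (vis : PySem.Set Int) (C : Finset Nat),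
    rs.length = routes.length →
    (∀ b : Nat, b < routes.length → rs.getD b [] = if b ∈ C then [] else routes.getD b []) →
    (∀ x ∈ BL, ∃ i : Nat, i < routes.length ∧ x = (i : Int)) →
    vis.Nodup →
    ∃ rs' q' vis',
      BL.foldl pvVisitBus (rs, q, vis) = (rs', q', vis') ∧
      rs'.length = routes.length ∧
      (∀ b : Nat, b < routes.length →
        rs'.getD b [] = if b ∈ C ∨ (b : Int) ∈ BL then [] else routes.getD b []) ∧
      vis'.Nodup ∧
      (∀ x, x ∈ vis' ↔ x ∈ vis ∨ ∃ i : Nat, (i : Int) ∈ BL ∧ i ∉ C ∧ x ∈ routes.getD i []) ∧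
      (∀ x, x ∈ q' ↔ x ∈ q ∨ ((∃ i : Nat, (i : Int) ∈ BL ∧ i ∉ C ∧ x ∈ routes.getD i []) ∧ x ∉ vis)) := by
  intro BL
  induction BL with
  | nil =>
    intro rs q vis C hlen hrs _ hnd
    refine ⟨rs, q, vis, rfl, hlen, ?_, hnd, by simp, by simp⟩
    intro b hb
    simpa using hrs b hb
  | cons bus BL ih =>
    intro rs q vis C hlen hrs hBL hnd
    obtain ⟨i, hi, rfl⟩ := hBL bus (List.mem_cons_self ..)
    obtain ⟨q₁, vis₁, heqf, hnd₁, hv₁, hq₁⟩ := pvFoldAdd (rs.getD i []) q vis hnd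
    have hilen : i < rs.length := by omega
    have hstep : pvVisitBus (rs, q, vis) (i : Int) = (rs.set i [], q₁, vis₁) := by
      unfold pvVisitBus
      simp only [PySem.List.pyGetD_natCast, PySem.List.pySetD_natCast]
      rw [heqf]
    rw [List.foldl_cons, hstep]
    have hlen' : (rs.set i []).length = routes.length := by simp [hlen]
    have hrs' : ∀ b : Nat, b < routes.length →
        (rs.set i []).getD b [] = if b ∈ insert i C then [] else routes.getD b [] := by
      intro b hb
      rw [getD_set_list rs i b hilen]
      by_cases hbi : i = b
      · subst hbi; simp
      · rw [if_neg hbi, hrs b hb]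
        have : (b ∈ insert i C) = (b ∈ C) := by
          apply propext
          rw [Finset.mem_insert]
          constructor
          · rintro (rfl | h)
            · exact absurd rfl hbi
            · exact h
          · exact .inr
        simp only [this]
    obtain ⟨rs', q', vis', heq, h1, h2, h3, h4, h5⟩ :=
      ih (rs.set i []) q₁ vis₁ (insert i C) hlen' hrs'
        (fun x hx => hBL x (List.mem_cons_of_mem _ hx)) hnd₁
    have hr : rs.getD i [] = if i ∈ C then [] else routes.getD i [] := hrs i hi
    have hIte : ∀ x : Int,
        x ∈ (if i ∈ C then ([] : List Int) else routes.getD i []) ↔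
          (i ∉ C ∧ x ∈ routes.getD i []) := by
      intro x; split <;> simp [*]
    have hP : ∀ x : Int,
        (∃ j : Nat, (j : Int) ∈ (i : Int) :: BL ∧ j ∉ C ∧ x ∈ routes.getD j []) ↔
        ((i ∉ C ∧ x ∈ routes.getD i []) ∨
          ∃ j : Nat, (j : Int) ∈ BL ∧ j ∉ insert i C ∧ x ∈ routes.getD j []) := by
      intro x
      simp only [List.mem_cons]
      constructor
      · rintro ⟨j, hj1 | hj1, hj2, hj3⟩
        · have : j = i := by exact_mod_cast hj1
          subst this
          exact .inl ⟨hj2, hj3⟩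
        · by_cases hji : j = i
          · subst hji
            exact .inl ⟨hj2, hj3⟩
          · refine .inr ⟨j, hj1, ?_, hj3⟩
            rw [Finset.mem_insert]
            rintro (h | h)
            · exact hji h
            · exact hj2 h
      · rintro (⟨h1, h2⟩ | ⟨j, hj1, hj2, hj3⟩)
        · exact ⟨i, .inl rfl, h1, h2⟩
        · refine ⟨j, .inr hj1, fun h => hj2 (Finset.mem_insert_of_mem h), hj3⟩
    refine ⟨rs', q', vis', heq, h1, ?_, h3, ?_, ?_⟩
    · intro b hb
      rw [h2 b hb]
      have : (b ∈ insert i C ∨ (b : Int) ∈ BL)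
          = (b ∈ C ∨ (b : Int) ∈ (i : Int) :: BL) := by
        apply propext
        simp only [Finset.mem_insert, List.mem_cons, Int.natCast_inj]
        tauto
      simp only [this]
    · intro x
      rw [h4 x, hv₁ x, hr, hP x]
      have := hIte x
      tauto
    · intro x
      have hv := hv₁ x
      rw [hr] at hv
      rw [h5 x, hq₁ x, hr, hP x]
      have h6 := hIte x
      tauto
def pvTch (routes : List (List Int)) (V : Finset Int) : Finset Nat :=
  (Finset.range routes.length).filter (fun b => ∃ s ∈ routes.getD b [], s ∈ V)

def pvSt (routes : List (List Int)) (C : Finset Nat) : Finset Int :=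
  C.biUnion (fun b => (routes.getD b []).toFinset)

theorem mem_pvTch (routes : List (List Int)) (V : Finset Int) (b : Nat) :
    b ∈ pvTch routes V ↔ b < routes.length ∧ ∃ s ∈ routes.getD b [], s ∈ V := by
  simp [pvTch]

theorem mem_pvSt (routes : List (List Int)) (C : Finset Nat) (x : Int) :
    x ∈ pvSt routes C ↔ ∃ b ∈ C, x ∈ routes.getD b [] := by
  simp [pvSt]

theorem pvSt_union_diff (routes : List (List Int)) (A B C : Finset Nat) (x : Int) :
    x ∈ pvSt routes ((A ∪ B) \ C) ↔
      x ∈ pvSt routes (A \ C) ∨ x ∈ pvSt routes (B \ (C ∪ A)) := by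
  simp only [mem_pvSt, Finset.mem_sdiff, Finset.mem_union]
  constructor
  · rintro ⟨b, ⟨hA | hB, hC⟩, hx⟩
    · exact .inl ⟨b, ⟨hA, hC⟩, hx⟩
    · by_cases hbA : b ∈ A
      · exact .inl ⟨b, ⟨hbA, hC⟩, hx⟩
      · exact .inr ⟨b, ⟨hB, by tauto⟩, hx⟩
  · rintro (⟨b, ⟨hA, hC⟩, hx⟩ | ⟨b, ⟨hB, hCA⟩, hx⟩)
    · exact ⟨b, ⟨.inl hA, hC⟩, hx⟩
    · exact ⟨b, ⟨.inr hB, by tauto⟩, hx⟩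
theorem pvTch_union (routes : List (List Int)) (A B : Finset Int) :
    pvTch routes (A ∪ B) = pvTch routes A ∪ pvTch routes B := by
  ext b
  simp only [Finset.mem_union, mem_pvTch]
  constructor
  · rintro ⟨hb, s, hs, hV | hV⟩
    · exact .inl ⟨hb, s, hs, hV⟩
    · exact .inr ⟨hb, s, hs, hV⟩
  · rintro (⟨hb, s, hs, hV⟩ | ⟨hb, s, hs, hV⟩)
    · exact ⟨hb, s, hs, .inl hV⟩
    · exact ⟨hb, s, hs, .inr hV⟩

theorem pvTch_mono (routes : List (List Int)) {A B : Finset Int} (h : A ⊆ B) :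
    pvTch routes A ⊆ pvTch routes B := by
  intro b hb
  rw [mem_pvTch] at hb ⊢
  obtain ⟨h1, s, hs, hV⟩ := hb
  exact ⟨h1, s, hs, h hV⟩

theorem pvTch_card_le (routes : List (List Int)) (V : Finset Int) :
    (pvTch routes V).card ≤ routes.length := by
  calc (pvTch routes V).card ≤ (Finset.range routes.length).card :=
        Finset.card_le_card (Finset.filter_subset _ _)
    _ = routes.length := Finset.card_range _
theorem pvProcLevel_inl (index : PySem.Dict Int (List Int)) (target k : Int) :
    ∀ (L : List Int) (st : List (List Int) × List Int × PySem.Set Int),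
    target ∈ L → pvProcLevel index target k L st = .inl k := by
  intro L
  induction L with
  | nil => intro st h; simp at h
  | cons s L ih =>
    intro st h
    by_cases hs : s = target
    · simp [pvProcLevel, hs]
    · rcases List.mem_cons.mp h with rfl | h
      · exact absurd rfl hs
      · simp only [pvProcLevel, if_neg hs]
        exact ih _ h
theorem pvProcLevel_inr (routes : List (List Int)) (index : PySem.Dict Int (List Int))
    (hidx : ∀ s b, b ∈ index.getD s []
      ↔ ∃ i : Nat, i < routes.length ∧ b = (i : Int) ∧ s ∈ routes.getD i [])
    (target k : Int) :
    ∀ (L : List Int) (rs : List (List Int)) (q : List Int) (vis : PySem.Set Int) (C : Finset Nat),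
    target ∉ L →
    rs.length = routes.length →
    (∀ b : Nat, b < routes.length → rs.getD b [] = if b ∈ C then [] else routes.getD b []) →
    vis.Nodup →
    ∃ rs' q' vis',
      pvProcLevel index target k L (rs, q, vis) = .inr (rs', q', vis') ∧
      rs'.length = routes.length ∧
      (∀ b : Nat, b < routes.length →
        rs'.getD b [] = if b ∈ C ∪ pvTch routes L.toFinset then [] else routes.getD b []) ∧
      vis'.Nodup ∧
      (∀ x, x ∈ vis' ↔ x ∈ vis ∨ x ∈ pvSt routes (pvTch routes L.toFinset \ C)) ∧
      (∀ x, x ∈ q' ↔ x ∈ q ∨ (x ∈ pvSt routes (pvTch routes L.toFinset \ C) ∧ x ∉ vis)) := by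
  intro L
  induction L with
  | nil =>
    intro rs q vis C _ hlen hrs hnd
    refine ⟨rs, q, vis, rfl, hlen, ?_, hnd, ?_, ?_⟩
    · intro b hb
      have hT : pvTch routes (∅ : Finset Int) = ∅ := by
        ext j; simp [mem_pvTch]
      simpa [hT] using hrs b hb
    · intro x; simp [mem_pvSt, mem_pvTch]
    · intro x; simp [mem_pvSt, mem_pvTch]
  | cons s L ih =>
    intro rs q vis C htgt hlen hrs hnd
    have hs : s ≠ target := fun h => htgt (h ▸ List.mem_cons_self ..)
    simp only [pvProcLevel, if_neg hs]
    obtain ⟨rs₁, q₁, vis₁, heq₁, hlen₁, hrs₁, hnd₁, hv₁, hq₁⟩ :=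
      pvFoldVisit routes (index.getD s []) rs q vis C hlen hrs
        (fun x hx => by
          obtain ⟨i, hi, rfl, _⟩ := (hidx s x).mp hx
          exact ⟨i, hi, rfl⟩) hnd
    -- membership in the bus list of stop s, as the Finset pvTch routes {s}
    have hBLmem : ∀ b : Nat, ((b : Int) ∈ index.getD s []) ↔ b ∈ pvTch routes {s} := by
      intro b
      rw [hidx, mem_pvTch]
      constructor
      · rintro ⟨i, hi, hcast, hmem⟩
        have : b = i := by exact_mod_cast hcast
        subst this
        exact ⟨hi, s, hmem, Finset.mem_singleton_self s⟩
      · rintro ⟨hb, s', hs', hss⟩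
        rw [Finset.mem_singleton] at hss
        subst hss
        exact ⟨b, hb, rfl, hs'⟩
    -- the per-stop new stops, as pvSt
    have hX₁ : ∀ x : Int,
        (∃ i : Nat, (i : Int) ∈ index.getD s [] ∧ i ∉ C ∧ x ∈ routes.getD i []) ↔
          x ∈ pvSt routes (pvTch routes {s} \ C) := by
      intro x
      simp only [mem_pvSt, Finset.mem_sdiff]
      constructor
      · rintro ⟨i, h1, h2, h3⟩
        exact ⟨i, ⟨(hBLmem i).mp h1, h2⟩, h3⟩
      · rintro ⟨i, ⟨h1, h2⟩, h3⟩
        exact ⟨i, (hBLmem i).mpr h1, h2, h3⟩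
    rw [heq₁]
    obtain ⟨rs', q', vis', heq, h1, h2, h3, h4, h5⟩ :=
      ih rs₁ q₁ vis₁ (C ∪ pvTch routes {s})
        (fun h => htgt (List.mem_cons_of_mem _ h)) hlen₁
        (fun b hb => by
          rw [hrs₁ b hb]
          have : (b ∈ C ∨ (b : Int) ∈ index.getD s []) = (b ∈ C ∪ pvTch routes {s}) := by
            apply propext
            rw [Finset.mem_union, hBLmem b]
          simp only [this]) hnd₁
    have hTcons : pvTch routes (s :: L).toFinset = pvTch routes {s} ∪ pvTch routes L.toFinset := by
      ext j
      simp only [List.toFinset_cons, mem_pvTch, Finset.mem_union, Finset.mem_insert,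
        List.mem_toFinset, Finset.mem_singleton]
      constructor
      · rintro ⟨hj, t, ht, rfl | ht2⟩
        · exact .inl ⟨hj, t, ht, rfl⟩
        · exact .inr ⟨hj, t, ht, by simpa using ht2⟩
      · rintro (⟨hj, t, ht, ht2⟩ | ⟨hj, t, ht, ht2⟩)
        · exact ⟨hj, t, ht, .inl ht2⟩
        · exact ⟨hj, t, ht, .inr (by simpa using ht2)⟩
    refine ⟨rs', q', vis', heq, h1, ?_, h3, ?_, ?_⟩
    · intro b hb
      rw [h2 b hb]
      have : (b ∈ C ∪ pvTch routes {s} ∪ pvTch routes L.toFinset)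
          = (b ∈ C ∪ pvTch routes (s :: L).toFinset) := by
        apply propext
        rw [hTcons]
        simp only [Finset.mem_union]
        tauto
      simp only [this]
    · intro x
      rw [h4 x, hv₁ x]
      have hsplit := pvSt_union_diff routes (pvTch routes {s}) (pvTch routes L.toFinset) C x
      rw [← hTcons] at hsplit
      rw [hsplit, ← hX₁ x]
      exact or_assoc
    · intro x
      have hv := hv₁ x
      rw [h5 x, hq₁ x]
      have hsplit := pvSt_union_diff routes (pvTch routes {s}) (pvTch routes L.toFinset) C x
      rw [← hTcons] at hsplit
      rw [hsplit, ← hX₁ x]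
      constructor
      · rintro ((h | ⟨hE, hv'⟩) | ⟨hR, hv1⟩)
        · exact .inl h
        · exact .inr ⟨.inl hE, hv'⟩
        · exact .inr ⟨.inr hR, fun hx => hv1 (hv.mpr (.inl hx))⟩
      · rintro (h | ⟨hE | hR, hv'⟩)
        · exact .inl (.inl h)
        · exact .inl (.inr ⟨hE, hv'⟩)
        · by_cases hx1 : x ∈ vis₁
          · rcases hv.mp hx1 with h' | h'
            · exact absurd h' hv'
            · exact .inl (.inr ⟨h', hv'⟩)
          · exact .inr ⟨hR, hx1⟩
theorem pvFoldNS (visited : PySem.Set Int) (r : List Int) :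
    ∀ (ns : PySem.Set Int), ns.Nodup →
    ∃ ns', r.foldl (fun ns s =>
        if PySem.Set.contains visited s then ns else PySem.Set.add ns s) ns = ns'
      ∧ ns'.Nodup ∧ (∀ x, x ∈ ns' ↔ x ∈ ns ∨ (x ∈ r ∧ x ∉ visited)) := by
  induction r with
  | nil => intro ns hnd; exact ⟨ns, rfl, hnd, by simp⟩
  | cons s r ih =>
    intro ns hnd
    simp only [List.foldl_cons]
    by_cases hs : s ∈ visited
    · rw [if_pos (by simpa [PySem.Set.contains_iff] using hs)]
      obtain ⟨ns', heq, h1, h2⟩ := ih ns hnd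
      refine ⟨ns', heq, h1, fun x => ?_⟩
      rw [h2]
      simp only [List.mem_cons]
      constructor
      · rintro (h | ⟨h, hv⟩)
        · exact .inl h
        · exact .inr ⟨.inr h, hv⟩
      · rintro (h | ⟨h | h, hv⟩)
        · exact .inl h
        · exact absurd (h ▸ hs) hv
        · exact .inr ⟨h, hv⟩
    · rw [if_neg (by simpa [PySem.Set.contains_iff] using hs)]
      obtain ⟨ns', heq, h1, h2⟩ := ih (PySem.Set.add ns s) (PySem.Set.nodup_add _ _ hnd)
      refine ⟨ns', heq, h1, fun x => ?_⟩
      rw [h2, PySem.Set.mem_add]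
      simp only [List.mem_cons]
      constructor
      · rintro ((h | rfl) | ⟨h, hv⟩)
        · exact .inl h
        · exact .inr ⟨.inl rfl, hs⟩
        · exact .inr ⟨.inr h, hv⟩
      · rintro (h | ⟨h | h, hv⟩)
        · exact .inl (.inl h)
        · exact .inl (.inr h)
        · by_cases hxs : x = s
          · exact .inl (.inr hxs)
          · exact .inr ⟨h, hv⟩
theorem pvMark (routes : List (List Int)) (visited : PySem.Set Int) :
    ∀ (BL : List Int) (us ns : PySem.Set Int),
    (∀ x ∈ BL, ∃ i : Nat, i < routes.length ∧ x = (i : Int)) →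
    us.Nodup → ns.Nodup →
    ∃ us' ns',
      BL.foldl (fun (p : PySem.Set Int × PySem.Set Int) b =>
        (PySem.Set.add p.1 b,
         (PySem.List.pyGetD routes b []).foldl
           (fun ns s => if PySem.Set.contains visited s then ns else PySem.Set.add ns s) p.2))
        (us, ns) = (us', ns')
      ∧ us'.Nodup ∧ ns'.Nodup
      ∧ (∀ x, x ∈ us' ↔ x ∈ us ∨ x ∈ BL)
      ∧ (∀ x, x ∈ ns' ↔ x ∈ ns ∨
          ∃ i : Nat, (i : Int) ∈ BL ∧ x ∈ routes.getD i [] ∧ x ∉ visited) := by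
  intro BL
  induction BL with
  | nil => intro us ns _ h1 h2; exact ⟨us, ns, rfl, h1, h2, by simp, by simp⟩
  | cons b BL ih =>
    intro us ns hBL h1 h2
    obtain ⟨i, hi, rfl⟩ := hBL b (List.mem_cons_self ..)
    simp only [List.foldl_cons]
    obtain ⟨ns₁, heqn, hn1, hn2⟩ := pvFoldNS visited (PySem.List.pyGetD routes (i : Int) []) ns h2
    rw [PySem.List.pyGetD_natCast] at heqn hn2
    obtain ⟨us', ns', heq, g1, g2, g3, g4⟩ :=
      ih (PySem.Set.add us (i : Int)) ns₁
        (fun x hx => hBL x (List.mem_cons_of_mem _ hx))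
        (PySem.Set.nodup_add _ _ h1) hn1
    refine ⟨us', ns', ?_, g1, g2, fun x => ?_, fun x => ?_⟩
    · show List.foldl _ (PySem.Set.add us (i : Int),
        (PySem.List.pyGetD routes (i : Int) []).foldl _ ns) BL = (us', ns')
      rw [PySem.List.pyGetD_natCast, heqn]
      exact heq
    · rw [g3 x, PySem.Set.mem_add]
      simp only [List.mem_cons]
      tauto
    · rw [g4 x, hn2 x]
      simp only [List.mem_cons]
      constructor
      · rintro ((h | ⟨h, hv⟩) | ⟨j, hj1, hj2, hj3⟩)
        · exact .inl h
        · exact .inr ⟨i, .inl rfl, h, hv⟩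
        · exact .inr ⟨j, .inr hj1, hj2, hj3⟩
      · rintro (h | ⟨j, hj1 | hj1, hj2, hj3⟩)
        · exact .inl (.inl h)
        · have : j = i := by exact_mod_cast hj1
          subst this
          exact .inl (.inr ⟨hj2, hj3⟩)
        · exact .inr ⟨j, hj1, hj2, hj3⟩
theorem pvNewBuses (routes : List (List Int)) (visited used : PySem.Set Int)
    (U : Finset Nat) (Vp : Finset Int)
    (hU : ∀ x, x ∈ used ↔ ∃ i : Nat, i ∈ U ∧ x = (i : Int))
    (hV : ∀ x, x ∈ visited ↔ x ∈ Vp) :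
    (∀ b : Nat, ((b : Int) ∈ (PySem.List.pyRange 0 (PySem.List.len routes) 1).filter
        (fun b => !(PySem.Set.contains used b) &&
          (PySem.List.pyGetD routes b []).any (fun s => PySem.Set.contains visited s))
      ↔ b ∈ pvTch routes Vp \ U))
    ∧ (∀ x ∈ (PySem.List.pyRange 0 (PySem.List.len routes) 1).filter
        (fun b => !(PySem.Set.contains used b) &&
          (PySem.List.pyGetD routes b []).any (fun s => PySem.Set.contains visited s)),
        ∃ i : Nat, i < routes.length ∧ x = (i : Int)) := by
  constructor
  · intro b
    rw [List.mem_filter]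
    simp only [Bool.and_eq_true, Bool.not_eq_true', List.any_eq_true]
    rw [PySem.List.mem_pyRange_one]
    simp only [PySem.List.len_eq, PySem.List.pyGetD_natCast]
    constructor
    · rintro ⟨⟨_, hlt⟩, hnu, s, hs, hcv⟩
      rw [Finset.mem_sdiff, mem_pvTch]
      refine ⟨⟨by exact_mod_cast hlt, s, hs, (hV s).mp ((PySem.Set.contains_iff _ _).mp hcv)⟩, ?_⟩
      intro hbU
      have : (b : Int) ∈ used := (hU _).mpr ⟨b, hbU, rfl⟩
      rw [← PySem.Set.contains_iff _ _] at this
      rw [this] at hnu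
      cases hnu
    · rintro hmem
      rw [Finset.mem_sdiff, mem_pvTch] at hmem
      obtain ⟨⟨hb, s, hs, hsV⟩, hbU⟩ := hmem
      refine ⟨⟨by positivity, by exact_mod_cast hb⟩, ?_, s, hs, ?_⟩
      · rw [← Bool.not_eq_true]
        intro hc
        obtain ⟨j, hj, hcast⟩ := (hU _).mp ((PySem.Set.contains_iff _ _).mp hc)
        have : b = j := by exact_mod_cast hcast
        exact hbU (this ▸ hj)
      · exact (PySem.Set.contains_iff _ _).mpr ((hV s).mpr hsV)
  · intro x hx
    rw [List.mem_filter] at hx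
    have := hx.1
    rw [PySem.List.mem_pyRange_one] at this
    simp only [PySem.List.len_eq] at this
    exact ⟨x.toNat, by omega, by omega⟩
theorem pvStage (routes : List (List Int)) (target : Int) (index : PySem.Dict Int (List Int))
    (hidx : ∀ s b, b ∈ index.getD s []
      ↔ ∃ i : Nat, i < routes.length ∧ b = (i : Int) ∧ s ∈ routes.getD i []) :
    ∀ (fuelA : Nat), ∀ (fuelB : Nat) (rs : List (List Int)) (q : List Int)
      (vis visB used : PySem.Set Int) (k : Int) (Vp Vc : Finset Int) (U : Finset Nat),
    rs.length = routes.length →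
    (∀ b : Nat, b < routes.length →
      rs.getD b [] = if b ∈ pvTch routes Vp then [] else routes.getD b []) →
    (∀ x, x ∈ q ↔ x ∈ Vc ∧ x ∉ Vp) →
    vis.Nodup → (∀ x, x ∈ vis ↔ x ∈ Vc) →
    visB.Nodup → (∀ x, x ∈ visB ↔ x ∈ Vp) →
    used.Nodup → (∀ x, x ∈ used ↔ ∃ i : Nat, i ∈ U ∧ x = (i : Int)) →
    U ⊆ pvTch routes Vp →
    (∀ x ∈ pvSt routes U, x ∈ Vp) →
    Vp ⊆ Vc →
    (∀ x, x ∈ Vc ↔ x ∈ Vp ∨ x ∈ pvSt routes (pvTch routes Vp)) →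
    target ∉ Vp →
    (if Vp = Vc then 1 else routes.length - (pvTch routes Vp).card + 2) ≤ fuelA →
    routes.length - U.card + 2 ≤ fuelB →
    pvLoopA index target fuelA rs q vis k = pvRoundB routes target fuelB visB used (k - 1) := by
  intro fuelA
  induction fuelA with
  | zero =>
    intro fuelB rs q vis visB used k Vp Vc U _ _ _ _ _ _ _ _ _ _ _ _ _ _ hfA _
    split at hfA <;> omega
  | succ fuelA ih =>
    intro fuelB rs q vis visB used k Vp Vc U hlen hrs hq hndv hvis hndB hvisB hndU hused
      hUsub hStU hVpVc hVc htgtp hfA hfB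
    obtain ⟨fb, rfl⟩ : ∃ fb, fuelB = fb + 1 := ⟨fuelB - 1, by omega⟩
    obtain ⟨⟨hBN1, hBN2⟩⟩ : Nonempty (_ ∧ _) := ⟨pvNewBuses routes visB used U Vp hused hvisB⟩
    by_cases hVpc : Vp = Vc
    · -- level is empty: A returns -1; B spins at most one more useless round, then -1
      subst hVpc
      have hqnil : q = [] := by
        rw [List.eq_nil_iff_forall_not_mem]
        intro x hx
        exact ((hq x).mp hx).2 ((hq x).mp hx).1
      subst hqnil
      simp only [pvLoopA, List.isEmpty_nil, if_true]
      by_cases hTU : pvTch routes Vp \ U = ∅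
      · have hnb : (PySem.List.pyRange 0 (PySem.List.len routes) 1).filter
            (fun b => !(PySem.Set.contains used b) &&
              (PySem.List.pyGetD routes b []).any (fun s => PySem.Set.contains visB s)) = [] := by
          rw [List.eq_nil_iff_forall_not_mem]
          intro x hx
          obtain ⟨i, _, rfl⟩ := hBN2 x hx
          have := (hBN1 i).mp hx
          rw [hTU] at this
          exact absurd this (Finset.notMem_empty i)
        simp only [pvRoundB, hnb, List.isEmpty_nil, if_true]
      · obtain ⟨j, hj⟩ := Finset.nonempty_iff_ne_empty.mpr hTU
        have hjnb := (hBN1 j).mpr hj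
        have hnbne : ((PySem.List.pyRange 0 (PySem.List.len routes) 1).filter
            (fun b => !(PySem.Set.contains used b) &&
              (PySem.List.pyGetD routes b []).any (fun s => PySem.Set.contains visB s))).isEmpty = false := by
          rw [List.isEmpty_eq_false_iff_exists_mem]
          exact ⟨_, hjnb⟩
        simp only [pvRoundB, hnbne, if_false, Bool.false_eq_true]
        obtain ⟨us', ns', heqm, hnu', hnn', hus', hns'⟩ :=
          pvMark routes visB _ used PySem.Set.empty
            (fun x hx => by
              obtain ⟨i, hi, rfl⟩ := hBN2 x hx
              exact ⟨i, hi, rfl⟩) hndU (by simp [PySem.Set.empty])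
        rw [pvMarkBuses, heqm]
        have hnsnil : ns' = [] := by
          rw [List.eq_nil_iff_forall_not_mem]
          intro x hx
          rcases (hns' x).mp hx with h | ⟨i, hiNB, hxr, hxv⟩
          · simp [PySem.Set.empty] at h
          · have hiT : i ∈ pvTch routes Vp \ U := (hBN1 i).mp hiNB
            have : x ∈ pvSt routes (pvTch routes Vp) := by
              rw [mem_pvSt]
              exact ⟨i, (Finset.mem_sdiff.mp hiT).1, hxr⟩
            exact hxv ((hvisB x).mpr ((hVc x).mpr (.inr this)))
        subst hnsnil
        have : PySem.Set.contains ([] : PySem.Set Int) target = false := rfl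
        simp only [this, if_false, Bool.false_eq_true]
        -- one more round: now every touching bus is used, no new bus: -1
        obtain ⟨fb', rfl⟩ : ∃ fb', fb = fb' + 1 := ⟨fb - 1, by omega⟩
        have hused' : ∀ x, x ∈ us' ↔ ∃ i : Nat, i ∈ U ∪ (pvTch routes Vp \ U) ∧ x = (i : Int) := by
          intro x
          rw [hus' x]
          constructor
          · rintro (h | h)
            · obtain ⟨i, hi, rfl⟩ := (hused x).mp h
              exact ⟨i, Finset.mem_union_left _ hi, rfl⟩
            · obtain ⟨i, hi, rfl⟩ := hBN2 x h
              exact ⟨i, Finset.mem_union_right _ ((hBN1 i).mp h), rfl⟩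
          · rintro ⟨i, hi, rfl⟩
            rcases Finset.mem_union.mp hi with hi | hi
            · exact .inl ((hused _).mpr ⟨i, hi, rfl⟩)
            · exact .inr ((hBN1 i).mpr hi)
        obtain ⟨⟨hBN1', _⟩⟩ : Nonempty (_ ∧ _) :=
          ⟨pvNewBuses routes (PySem.Set.update visB []) us' (U ∪ (pvTch routes Vp \ U)) Vp
            hused' (fun x => by simp [PySem.Set.update, hvisB x])⟩
        have hnb2 : (PySem.List.pyRange 0 (PySem.List.len routes) 1).filter
            (fun b => !(PySem.Set.contains us' b) &&
              (PySem.List.pyGetD routes b []).any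
                (fun s => PySem.Set.contains (PySem.Set.update visB []) s)) = [] := by
          rw [List.eq_nil_iff_forall_not_mem]
          intro x hx
          have hx' := hx
          rw [List.mem_filter] at hx'
          have hr := hx'.1
          rw [PySem.List.mem_pyRange_one] at hr
          simp only [PySem.List.len_eq] at hr
          obtain ⟨i, rfl⟩ : ∃ i : Nat, x = (i : Int) := ⟨x.toNat, by omega⟩
          have hmem := (hBN1' i).mp hx
          rw [Finset.mem_sdiff] at hmem
          apply hmem.2
          by_cases hiU : i ∈ U
          · exact Finset.mem_union_left _ hiU
          · exact Finset.mem_union_right _ (Finset.mem_sdiff.mpr ⟨hmem.1, hiU⟩)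
        simp only [pvRoundB, hnb2, List.isEmpty_nil, if_true]
    · -- the level is nonempty
      have hVpssVc : Vp ⊂ Vc := Finset.ssubset_iff_subset_ne.mpr ⟨hVpVc, hVpc⟩
      rw [if_neg hVpc] at hfA
      obtain ⟨x0, hx0c, hx0p⟩ := Finset.exists_of_ssubset hVpssVc
      have hx0st : x0 ∈ pvSt routes (pvTch routes Vp) := by
        rcases (hVc x0).mp hx0c with h | h
        · exact absurd h hx0p
        · exact h
      obtain ⟨b0, hb0T, hx0b0⟩ := (mem_pvSt ..).mp hx0st
      have hb0U : b0 ∉ U := fun hb0 => hx0p (hStU x0 ((mem_pvSt ..).mpr ⟨b0, hb0, hx0b0⟩))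
      have hb0TU : b0 ∈ pvTch routes Vp \ U := Finset.mem_sdiff.mpr ⟨hb0T, hb0U⟩
      have hqne : q.isEmpty = false := by
        rw [List.isEmpty_eq_false_iff_exists_mem]
        exact ⟨x0, (hq x0).mpr ⟨hx0c, hx0p⟩⟩
      have hnbne : ((PySem.List.pyRange 0 (PySem.List.len routes) 1).filter
          (fun b => !(PySem.Set.contains used b) &&
            (PySem.List.pyGetD routes b []).any (fun s => PySem.Set.contains visB s))).isEmpty = false := by
        rw [List.isEmpty_eq_false_iff_exists_mem]
        exact ⟨_, (hBN1 b0).mpr hb0TU⟩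
      simp only [pvLoopA, pvRoundB, hqne, hnbne, if_false, Bool.false_eq_true]
      obtain ⟨us', ns', heqm, hnu', hnn', hus', hns'⟩ :=
        pvMark routes visB _ used PySem.Set.empty
          (fun x hx => by
            obtain ⟨i, hi, rfl⟩ := hBN2 x hx
            exact ⟨i, hi, rfl⟩) hndU (by simp [PySem.Set.empty])
      rw [pvMarkBuses, heqm]
      have hns : ∀ x, x ∈ ns' ↔ (x ∈ Vc ∧ x ∉ Vp) := by
        intro x
        rw [hns' x]
        constructor
        · rintro (h | ⟨i, hiNB, hxr, hxv⟩)
          · simp [PySem.Set.empty] at h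
          · have hiT := Finset.mem_sdiff.mp ((hBN1 i).mp hiNB)
            refine ⟨(hVc x).mpr (.inr ((mem_pvSt ..).mpr ⟨i, hiT.1, hxr⟩)), ?_⟩
            exact fun hxp => hxv ((hvisB x).mpr hxp)
        · rintro ⟨hxc, hxp⟩
          rcases (hVc x).mp hxc with h | h
          · exact absurd h hxp
          · obtain ⟨b1, hb1T, hxb1⟩ := (mem_pvSt ..).mp h
            have hb1U : b1 ∉ U := fun hb1 => hxp (hStU x ((mem_pvSt ..).mpr ⟨b1, hb1, hxb1⟩))
            refine .inr ⟨b1, (hBN1 b1).mpr (Finset.mem_sdiff.mpr ⟨hb1T, hb1U⟩), hxb1, ?_⟩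
            exact fun hv => hxp ((hvisB x).mp hv)
      by_cases htc : target ∈ Vc
      · -- found: both return k
        have hAfind := pvProcLevel_inl index target k q (rs, [], vis) ((hq target).mpr ⟨htc, htgtp⟩)
        rw [hAfind]
        have : PySem.Set.contains ns' target = true :=
          (PySem.Set.contains_iff _ _).mpr ((hns target).mpr ⟨htc, htgtp⟩)
        simp only [this, if_true]
        omega
      · -- not found: one more level / round on each side
        have htq : target ∉ q := fun h => htc ((hq target).mp h).1
        obtain ⟨rs', q', vis', heqA, hlen', hrs', hndv', hvis', hq'⟩ :=
          pvProcLevel_inr routes index hidx target k q rs [] vis (pvTch routes Vp)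
            htq hlen hrs hndv
        rw [heqA]
        have : PySem.Set.contains ns' target = false := by
          rw [← Bool.not_eq_true]
          intro h
          exact htc ((hns target).mp ((PySem.Set.contains_iff _ _).mp h)).1
        simp only [this, if_false, Bool.false_eq_true]
        -- the next stage
        have hqtf : q.toFinset = Vc \ Vp := by
          ext x
          rw [List.mem_toFinset, hq x, Finset.mem_sdiff]
        have hTq : pvTch routes q.toFinset = pvTch routes (Vc \ Vp) := by rw [hqtf]
        have hTCup : pvTch routes Vp ∪ pvTch routes (Vc \ Vp) = pvTch routes Vc := by
          rw [← pvTch_union]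
          congr 1
          exact Finset.union_sdiff_of_subset hVpVc
        have hTsub : pvTch routes Vp ⊆ pvTch routes Vc := pvTch_mono routes hVpssVc.subset
        have hcardVp := pvTch_card_le routes Vp
        have hcardVc := pvTch_card_le routes Vc
        -- the new visited-stop set
        have hXlem : ∀ x : Int,
            x ∈ pvSt routes (pvTch routes (Vc \ Vp) \ pvTch routes Vp) ∨ x ∈ Vc ↔
              x ∈ pvSt routes (pvTch routes Vc) ∨ x ∈ Vc := by
          intro x
          constructor
          · rintro (h | h)
            · refine .inl ?_
              obtain ⟨b, hb, hxb⟩ := (mem_pvSt ..).mp h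
              exact (mem_pvSt ..).mpr ⟨b, (hTCup ▸ Finset.mem_union_right _ (Finset.mem_sdiff.mp hb).1), hxb⟩
            · exact .inr h
          · rintro (h | h)
            · obtain ⟨b, hb, hxb⟩ := (mem_pvSt ..).mp h
              rw [← hTCup, Finset.mem_union] at hb
              rcases hb with hb | hb
              · exact .inr ((hVc x).mpr (.inr ((mem_pvSt ..).mpr ⟨b, hb, hxb⟩)))
              · by_cases hbVp : b ∈ pvTch routes Vp
                · exact .inr ((hVc x).mpr (.inr ((mem_pvSt ..).mpr ⟨b, hbVp, hxb⟩)))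
                · exact .inl ((mem_pvSt ..).mpr ⟨b, Finset.mem_sdiff.mpr ⟨hb, hbVp⟩, hxb⟩)
            · exact .inr h
        have hused2 : ∀ x, x ∈ us' ↔ ∃ i : Nat, i ∈ pvTch routes Vp ∧ x = (i : Int) := by
          intro x
          rw [hus' x]
          constructor
          · rintro (h | h)
            · obtain ⟨i, hi, rfl⟩ := (hused x).mp h
              exact ⟨i, hUsub hi, rfl⟩
            · obtain ⟨i, hi, rfl⟩ := hBN2 x h
              exact ⟨i, (Finset.mem_sdiff.mp ((hBN1 i).mp h)).1, rfl⟩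
          · rintro ⟨i, hi, rfl⟩
            by_cases hiU : i ∈ U
            · exact .inl ((hused _).mpr ⟨i, hiU, rfl⟩)
            · exact .inr ((hBN1 i).mpr (Finset.mem_sdiff.mpr ⟨hi, hiU⟩))
        have hUcard : U.card < (pvTch routes Vp).card :=
          Finset.card_lt_card (Finset.ssubset_iff_subset_ne.mpr
            ⟨hUsub, fun h => hb0U (h ▸ hb0T)⟩)
        have hres := ih fb rs' q' vis' (PySem.Set.update visB ns') us' (k + 1)
          Vc (Vc ∪ pvSt routes (pvTch routes Vc)) (pvTch routes Vp)
          hlen'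
          (fun b hb => by
            rw [hrs' b hb]
            have : (b ∈ pvTch routes Vp ∪ pvTch routes q.toFinset)
                = (b ∈ pvTch routes Vc) := by
              rw [hTq, hTCup]
            simp only [this])
          (fun x => by
            rw [hq' x, hTq]
            simp only [List.not_mem_nil, false_or]
            constructor
            · rintro ⟨hX, hv⟩
              have hxc : x ∉ Vc := fun h => hv ((hvis x).mpr h)
              rcases (hXlem x).mp (.inl hX) with h | h
              · exact ⟨Finset.mem_union_right _ h, hxc⟩
              · exact absurd h hxc
            · rintro ⟨hX, hxc⟩
              rcases Finset.mem_union.mp hX with h | h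
              · exact absurd h hxc
              · rcases (hXlem x).mpr (.inl h) with h' | h'
                · exact ⟨h', fun hv => hxc ((hvis x).mp hv)⟩
                · exact absurd h' hxc)
          hndv'
          (fun x => by
            rw [hvis' x, hTq]
            rw [Finset.mem_union]
            constructor
            · rintro (h | h)
              · exact .inl ((hvis x).mp h)
              · rcases (hXlem x).mp (.inl h) with h' | h'
                · exact .inr h'
                · exact .inl h'
            · rintro (h | h)
              · exact .inl ((hvis x).mpr h)
              · rcases (hXlem x).mpr (.inl h) with h' | h'
                · exact .inr h'
                · exact .inl ((hvis x).mpr h'))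
          (PySem.Set.nodup_update _ _ hndB)
          (fun x => by
            rw [PySem.Set.mem_update, hvisB x, hns x]
            constructor
            · rintro (h | ⟨h, _⟩)
              · exact ((hVc x).mpr (.inl h) : x ∈ Vc)
              · exact h
            · intro h
              by_cases hp : x ∈ Vp
              · exact .inl hp
              · exact .inr ⟨h, hp⟩)
          hnu' hused2
          (pvTch_mono routes hVpssVc.subset)
          (fun x hx => by
            obtain ⟨b, hb, hxb⟩ := (mem_pvSt ..).mp hx
            exact (hVc x).mpr (.inr ((mem_pvSt ..).mpr ⟨b, hb, hxb⟩)))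
          Finset.subset_union_left
          (fun x => by rw [Finset.mem_union])
          htc
          (by
            by_cases hTT : pvTch routes Vc = pvTch routes Vp
            · have hVcVc : Vc = Vc ∪ pvSt routes (pvTch routes Vc) := by
                apply Finset.Subset.antisymm Finset.subset_union_left
                intro x hx
                rcases Finset.mem_union.mp hx with h | h
                · exact h
                · exact (hVc x).mpr (.inr (hTT ▸ h))
              rw [if_pos hVcVc]
              omega
            · have : (pvTch routes Vp).card < (pvTch routes Vc).card :=
                Finset.card_lt_card (Finset.ssubset_iff_subset_ne.mpr ⟨hTsub, Ne.symm hTT⟩)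
              split
              · omega
              · omega)
          (by omega)
        rw [hres]
        have : k + 1 - 1 = k - 1 + 1 := by ring
        rw [this]
theorem pvLoopA_succ (index : PySem.Dict Int (List Int)) (target : Int) (fuel : Nat)
    (rs : List (List Int)) (q : List Int) (vis : PySem.Set Int) (k : Int) :
    pvLoopA index target (fuel + 1) rs q vis k =
      if q.isEmpty then -1
      else
        match pvProcLevel index target k q (rs, [], vis) with
        | .inl r => r
        | .inr (rs', q', vis') => pvLoopA index target fuel rs' q' vis' (k + 1) := rfl
theorem main_equiv (routes : List (List Int)) (source target : Int)
    (hpre : source = target ∨ ∃ r ∈ routes, source ∈ r) :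
    numBusesToDestination4 routes source target = numBusesToDestination4_alt routes source target := by
  unfold numBusesToDestination4 numBusesToDestination4_alt
  have hstep : routes.length + 2 = (routes.length + 1) + 1 := rfl
  by_cases hst : source = target
  · rw [hstep, pvLoopA_succ]
    simp [pvProcLevel, hst]
  · rcases hpre with h | ⟨r, hr, hsr⟩
    · exact absurd h hst
    · obtain ⟨i, hi, rfl⟩ := List.mem_iff_getElem.mp hr
      have hsrc : source ∈ routes.getD i [] := by
        rwa [List.getD_eq_getElem?_getD, List.getElem?_eq_getElem hi]
      have hiT : i ∈ pvTch routes {source} :=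
        (mem_pvTch ..).mpr ⟨hi, source, hsrc, Finset.mem_singleton_self _⟩
      have htgt : target ∉ ([source] : List Int) := by
        simp only [List.mem_singleton]
        exact fun h => hst h.symm
      obtain ⟨rs', q', vis', heq, hlen', hrs', hndv', hvis', hq'⟩ :=
        pvProcLevel_inr routes (pvBuildIndex routes) (mem_pvBuildIndex routes) target 0
          [source] routes [] (PySem.Set.ofList [source]) ∅
          htgt rfl (by intro b hb; simp) (PySem.Set.nodup_ofList _)
      rw [hstep, pvLoopA_succ]
      rw [if_neg (by simp), if_neg hst, heq]
      show pvLoopA (pvBuildIndex routes) target (routes.length + 1) rs' q' vis' (0 + 1)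
        = pvRoundB routes target (routes.length + 1 + 1) (PySem.Set.ofList [source]) PySem.Set.empty 0
      have h01 : (0 : Int) + 1 = 1 := rfl
      rw [h01]
      have hsing : ([source] : List Int).toFinset = {source} := by simp
      have hmemsing : ∀ x : Int, x ∈ PySem.Set.ofList [source] ↔ x = source := by
        intro x
        rw [PySem.Set.mem_ofList, List.mem_singleton]
      have hTch : pvTch routes (([source] : List Int).toFinset) \ ∅ = pvTch routes {source} := by
        rw [hsing, Finset.sdiff_empty]
      have hres := pvStage routes target (pvBuildIndex routes) (mem_pvBuildIndex routes)
        (routes.length + 1) (routes.length + 2) rs' q' vis'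
        (PySem.Set.ofList [source]) PySem.Set.empty 1
        {source} ({source} ∪ pvSt routes (pvTch routes {source})) ∅
        hlen'
        (fun b hb => by
          rw [hrs' b hb]
          have : (b ∈ (∅ : Finset Nat) ∪ pvTch routes (([source] : List Int).toFinset))
              = (b ∈ pvTch routes {source}) := by
            rw [Finset.empty_union, hsing]
          simp only [this])
        (fun x => by
          rw [hq' x, hTch]
          simp only [List.not_mem_nil, false_or, Finset.mem_union, Finset.mem_singleton]
          rw [hmemsing x]
          tauto)
        hndv'
        (fun x => by
          rw [hvis' x, hTch, hmemsing x]
          simp only [Finset.mem_union, Finset.mem_singleton])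
        (PySem.Set.nodup_ofList _)
        (fun x => by rw [hmemsing x, Finset.mem_singleton])
        (by simp [PySem.Set.empty])
        (fun x => by simp [PySem.Set.empty])
        (Finset.empty_subset _)
        (fun x hx => by
          rw [mem_pvSt] at hx
          obtain ⟨b, hb, _⟩ := hx
          exact absurd hb (Finset.notMem_empty b))
        Finset.subset_union_left
        (fun x => by rw [Finset.mem_union])
        (by rw [Finset.mem_singleton]; exact fun h => hst h.symm)
        (by
          have hcard : 0 < (pvTch routes {source}).card := Finset.card_pos.mpr ⟨i, hiT⟩
          have hle := pvTch_card_le routes {source}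
          split
          · omega
          · omega)
        (by simp)
      rw [hres]
      norm_num

-- ===== VERDICT (by name: the statement is the Claim_ definition above) =====
theorem numBusesToDestination4_spec : Claim_equal_numBusesToDestination4 := by
  intro routes source target _ hpre
  unfold Spec_numBusesToDestination4
  unfold Pre_numBusesToDestination4 at hpre
  exact main_equiv routes source target hpre
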